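-- pv_equiv track=rewrite | github.com/d8veone/NLP_CNN | Insert5max.py | solution
-- ===== SOURCE A (Python) =====
-- def solution(N):
--     # write your code in Python 3.6
--     if N >= 0:
--         str1 = str(N)
--         for n in str1:
--             if int(n) < 5:
--                 index1 = str1.index(n)
--                 if index1==0:
--                     str2 = '5'+str1
--                     break
--                 else:
--                     str2 = str1[:index1]+'5'+str1[index1:]
--                     break
--             else:
--                 str2 = str1+'5'
--         return str2
--
--     if N < 0:
--         str1 = str(abs(N))
--         for n in str1:
--             if int(n) > 5:
--                 index1 = str1.index(n)
--                 if index1==0: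
--                    str2 = '5'+str1
--                    break
--                 else:
--                    str2 = str1[:index1]+'5'+str1[index1:]
--                    break
--             else:
--                 str2 = str1+'5'
--         return "-"+str2
-- ===== SOURCE B (Python) =====
-- def solution(N):
--     s = str(abs(N))
--     cands = [s[:i] + '5' + s[i:] for i in range(len(s) + 1)]
--     if N >= 0:
--         return max(cands)
--     return '-' + min(cands)
-- ===== Notes on version B (the rewrite author's own statement) =====
-- stated objective: alternative
-- what changed: A's greedy scan for the first digit below/above five (with str.index and slicing inside the loop) is replaced by generating the insertion candidates at every position and taking the lexicographic max (min for negatives), which coincides with the numeric optimum since all candidates have equal length.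
import Mathlib
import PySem

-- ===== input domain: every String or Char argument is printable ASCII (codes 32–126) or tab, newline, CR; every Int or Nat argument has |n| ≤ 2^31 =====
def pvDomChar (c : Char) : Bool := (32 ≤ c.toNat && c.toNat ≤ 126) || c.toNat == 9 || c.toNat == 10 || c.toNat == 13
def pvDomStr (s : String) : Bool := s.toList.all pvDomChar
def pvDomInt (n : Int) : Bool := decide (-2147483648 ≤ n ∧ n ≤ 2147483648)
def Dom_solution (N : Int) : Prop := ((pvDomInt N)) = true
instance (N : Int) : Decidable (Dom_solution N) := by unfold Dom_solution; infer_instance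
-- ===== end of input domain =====

-- B replaces A's greedy first-qualifying-digit scan by generating all insertion
-- candidates and selecting the lexicographic max (min for negatives) — objective: alternative algorithm.


-- ===== PORT A =====
-- int(n) for the one-character string n (n is always a decimal digit here, so getD 0 never fires)
def pvIntOfChar (c : Char) : Int := (PySem.Int.ofChars? [c]).getD 0

-- the body executed when the scan finds its digit: `'5'+str1` if index1==0 else `str1[:index1]+'5'+str1[index1:]`
def pvBuild (str1 : List Char) (index1 : Int) : List Char :=
  if index1 = 0 then '5' :: str1
  else PySem.List.slice str1 none (some index1) ++ '5' :: PySem.List.slice str1 (some index1) none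

-- A's `for n in str1: …` with its break; both of A's loops have this shape, only the
-- comparison against 5 differs (p).  Falling off the end leaves str2 = str1+'5'.
def pvLoop (p : Int → Bool) (str1 : List Char) : List Char → List Char
  | [] => str1 ++ ['5']
  | n :: rest =>
    if p (pvIntOfChar n) then pvBuild str1 (PySem.Chars.find str1 [n])
    else pvLoop p str1 rest

def solution (N : Int) : String :=
  if 0 ≤ N then
    String.ofList
      (pvLoop (fun v => decide (v < 5)) (PySem.Int.toStr N).toList (PySem.Int.toStr N).toList)
  else
    String.ofList
      ('-' :: pvLoop (fun v => decide (5 < v)) (PySem.Int.toStr (N.natAbs : Int)).toList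
        (PySem.Int.toStr (N.natAbs : Int)).toList)

-- ===== PORT B =====
-- [s[:i] + '5' + s[i:] for i in range(len(s)+1)]
def pvCands (s : List Char) : List (List Char) :=
  (PySem.List.pyRange 0 (PySem.List.len s + 1) 1).map
    (fun i => PySem.List.slice s none (some i) ++ '5' :: PySem.List.slice s (some i) none)

def solution_alt (N : Int) : String :=
  if 0 ≤ N then
    String.ofList
      ((PySem.List.max? (pvCands (PySem.Int.toStr (N.natAbs : Int)).toList) (fun c => c)).getD [])
  else
    String.ofList
      ('-' :: (PySem.List.min? (pvCands (PySem.Int.toStr (N.natAbs : Int)).toList) (fun c => c)).getD [])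

-- ===== PRECONDITION & SPEC =====
def Spec_solution (N : Int) (out : String) : Prop := out = solution_alt N
instance (N : Int) (out : String) : Decidable (Spec_solution N out) := by unfold Spec_solution; infer_instance

-- ===== CLAIM (what is proved, stated in full; the proofs are below) =====
def Claim_equal_solution : Prop := ∀ (N : Int), Dom_solution N → Spec_solution N (solution N)

-- ===== LEMMAS AND PROOFS =====

-- candidate with '5' inserted at position i
def pvCandAt (s : List Char) (i : Nat) : List Char := s.take i ++ '5' :: s.drop i

lemma pvCands_eq (s : List Char) :
    pvCands s = (List.range (s.length + 1)).map (pvCandAt s) := by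
  unfold pvCands pvCandAt
  rw [PySem.List.pyRange_one]
  have : ((PySem.List.len s + 1 - 0).toNat) = s.length + 1 := by
    simp [PySem.List.len]
  rw [this, List.map_map]
  refine List.map_congr_left (fun k _ => ?_)
  simp [PySem.List.slice_to_natCast, PySem.List.slice_from_natCast]

lemma pvMem_cands {s y : List Char} :
    y ∈ pvCands s ↔ ∃ k, k ≤ s.length ∧ y = pvCandAt s k := by
  rw [pvCands_eq]
  simp only [List.mem_map, List.mem_range, Nat.lt_succ_iff]
  constructor
  · rintro ⟨k, hk, rfl⟩; exact ⟨k, hk, rfl⟩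
  · rintro ⟨k, hk, rfl⟩; exact ⟨k, hk, rfl⟩

lemma pvCands_ne_nil (s : List Char) : pvCands s ≠ [] := by
  rw [pvCands_eq]; simp

-- lexicographic comparison under a common prefix
lemma pvLt_append_cons (a : List Char) {x y : Char} (u v : List Char) (h : x < y) :
    a ++ x :: u < a ++ y :: v := by
  induction a with
  | nil => exact List.cons_lt_cons_iff.2 (Or.inl h)
  | cons c t ih => simp only [List.cons_append]; exact List.cons_lt_cons_iff.2 (Or.inr ⟨rfl, ih⟩)

lemma pvCandAt_decomp (s : List Char) {i j : Nat} (hij : i < j) (hj : j ≤ s.length) :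
    pvCandAt s j = s.take i ++ s[i]'(lt_of_lt_of_le hij hj) ::
      ((s.drop (i + 1)).take (j - (i + 1)) ++ '5' :: s.drop j) := by
  have hi : i < s.length := lt_of_lt_of_le hij hj
  have h1 : s.take j = s.take i ++ s[i] :: (s.drop (i + 1)).take (j - (i + 1)) := by
    conv_lhs => rw [show j = i + (j - i) by omega]
    rw [List.take_add, List.drop_eq_getElem_cons hi,
      show j - i = (j - (i + 1)) + 1 by omega, List.take_succ_cons]
  unfold pvCandAt
  rw [h1]
  simp [List.append_assoc]

lemma pvCandAt_lt_of_lt_at {s : List Char} {i j : Nat} (hij : i < j) (hj : j ≤ s.length)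
    (h : s[i]'(lt_of_lt_of_le hij hj) < '5') : pvCandAt s j < pvCandAt s i := by
  rw [pvCandAt_decomp s hij hj]
  exact pvLt_append_cons _ _ _ h

lemma pvCandAt_lt_of_gt_at {s : List Char} {i j : Nat} (hij : i < j) (hj : j ≤ s.length)
    (h : '5' < s[i]'(lt_of_lt_of_le hij hj)) : pvCandAt s i < pvCandAt s j := by
  rw [pvCandAt_decomp s hij hj]
  exact pvLt_append_cons _ _ _ h

lemma pvCandAt_succ_eq {s : List Char} {i : Nat} (hi : i < s.length)
    (h5 : s[i] = '5') : pvCandAt s i = pvCandAt s (i + 1) := by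
  rw [pvCandAt_decomp s (Nat.lt_succ_self i) hi]
  unfold pvCandAt
  rw [List.drop_eq_getElem_cons hi, h5]
  simp

-- the port elaborates max?/min? with core's List order instances; the PySem order lemmas
-- use the LinearOrder-derived ones — identical (Decidable is a subsingleton), recorded once:
lemma pvDecLT_eq :
    (fun (a b : List Char) => a.decidableLT b) = (LinearOrder.toDecidableLT : DecidableLT (List Char)) := by
  funext a b
  exact Subsingleton.elim _ _

-- A's greedy insertion position is the maximum candidate (positive case)
lemma pvCandAt_le_greedy {s : List Char} {q : Nat} (hq : q ≤ s.length)
    (hbefore : ∀ i (h : i < s.length), i < q → ¬ s[i] < '5')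
    (hat : ∀ h : q < s.length, s[q] < '5') :
    ∀ j, j ≤ s.length → pvCandAt s j ≤ pvCandAt s q := by
  have climb : ∀ d j, j ≤ q → q - j ≤ d → pvCandAt s j ≤ pvCandAt s q := by
    intro d
    induction d with
    | zero => intro j hj hd; exact le_of_eq (by rw [show j = q by omega])
    | succ d ih =>
      intro j hj hd
      rcases Nat.eq_or_lt_of_le hj with rfl | hjq
      · exact le_refl _
      · have hjl : j < s.length := lt_of_lt_of_le hjq hq
        have h5le : '5' ≤ s[j] := le_of_not_gt (hbefore j hjl hjq)
        rcases eq_or_lt_of_le h5le with heq | hlt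
        · rw [pvCandAt_succ_eq hjl heq.symm]
          exact ih (j + 1) hjq (by omega)
        · exact le_of_lt (pvCandAt_lt_of_gt_at hjq hq hlt)
  intro j hj
  rcases lt_trichotomy j q with hlt | rfl | hgt
  · exact climb q j (le_of_lt hlt) (by omega)
  · exact le_refl _
  · have hql : q < s.length := lt_of_lt_of_le hgt hj
    exact le_of_lt (pvCandAt_lt_of_lt_at hgt hj (hat hql))

-- the mirror image: greedy insertion is the minimum candidate (negative case)
lemma pvGreedy_le_candAt {s : List Char} {q : Nat} (hq : q ≤ s.length)
    (hbefore : ∀ i (h : i < s.length), i < q → ¬ '5' < s[i])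
    (hat : ∀ h : q < s.length, '5' < s[q]) :
    ∀ j, j ≤ s.length → pvCandAt s q ≤ pvCandAt s j := by
  have climb : ∀ d j, j ≤ q → q - j ≤ d → pvCandAt s q ≤ pvCandAt s j := by
    intro d
    induction d with
    | zero => intro j hj hd; exact le_of_eq (by rw [show j = q by omega])
    | succ d ih =>
      intro j hj hd
      rcases Nat.eq_or_lt_of_le hj with rfl | hjq
      · exact le_refl _
      · have hjl : j < s.length := lt_of_lt_of_le hjq hq
        have h5le : s[j] ≤ '5' := le_of_not_gt (hbefore j hjl hjq)
        rcases eq_or_lt_of_le h5le with heq | hlt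
        · rw [pvCandAt_succ_eq hjl heq]
          exact ih (j + 1) hjq (by omega)
        · exact le_of_lt (pvCandAt_lt_of_lt_at hjq hq hlt)
  intro j hj
  rcases lt_trichotomy j q with hlt | rfl | hgt
  · exact climb q j (le_of_lt hlt) (by omega)
  · exact le_refl _
  · have hql : q < s.length := lt_of_lt_of_le hgt hj
    exact le_of_lt (pvCandAt_lt_of_gt_at hgt hj (hat hql))

-- str1.index(n) when n's first occurrence is right after a prefix avoiding n
lemma pvFind_first (pre : List Char) (n : Char) (rest : List Char) (hn : n ∉ pre) :
    PySem.Chars.find (pre ++ n :: rest) [n] = (pre.length : Int) := by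
  set s := pre ++ n :: rest with hs
  have hinf : [n] <:+: s := ⟨pre, rest, by simp [hs]⟩
  have h0 : 0 ≤ PySem.Chars.find s [n] := (PySem.Chars.find_nonneg_iff s [n]).2 hinf
  obtain ⟨hpref, hmin⟩ := PySem.Chars.find_spec h0
  set t := (PySem.Chars.find s [n]).toNat with ht
  have hdropL : s.drop pre.length = n :: rest := by rw [hs]; exact List.drop_left
  have hle : t ≤ pre.length := by
    by_contra h
    rw [Nat.not_le] at h
    exact hmin pre.length h ⟨rest, by rw [hdropL]; rfl⟩
  have hne : ¬ t < pre.length := by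
    intro hlt
    obtain ⟨u, hu⟩ := hpref
    have hget : s[t]? = some n := by
      have h1 : (s.drop t)[0]? = some n := by rw [← hu]; rfl
      rw [List.getElem?_drop] at h1
      simpa using h1
    have hget' : pre[t]? = some n := by
      rw [hs] at hget
      rwa [List.getElem?_append_left hlt] at hget
    exact hn (List.mem_of_getElem? hget')
  have htq : t = pre.length := by omega
  have : PySem.Chars.find s [n] = (t : Int) := (Int.toNat_of_nonneg h0).symm
  rw [this, htq]

-- what A's loop computes: a greedy insertion position q
lemma pvLoop_spec (p : Int → Bool) (str1 : List Char) :
    ∀ suf pre, str1 = pre ++ suf → (∀ c ∈ pre, p (pvIntOfChar c) = false) →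
    ∃ q, q ≤ str1.length ∧ pvLoop p str1 suf = pvCandAt str1 q ∧
      (∀ i (h : i < str1.length), i < q → p (pvIntOfChar str1[i]) = false) ∧
      (∀ h : q < str1.length, p (pvIntOfChar str1[q]) = true) := by
  intro suf
  induction suf with
  | nil =>
    intro pre hdec hpre
    rw [List.append_nil] at hdec
    refine ⟨str1.length, le_refl _, ?_, ?_, fun h => absurd h (lt_irrefl _)⟩
    · unfold pvCandAt
      simp [pvLoop]
    · intro i hi _
      apply hpre
      rw [← hdec]
      exact List.getElem_mem hi
  | cons n rest ih =>
    intro pre hdec hpre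
    subst hdec
    by_cases hp : p (pvIntOfChar n) = true
    · refine ⟨pre.length, by simp, ?_, ?_, ?_⟩
      · have hn : n ∉ pre := by
          intro hmem
          rw [hpre n hmem] at hp
          exact Bool.false_ne_true hp
        have hfind : PySem.Chars.find (pre ++ n :: rest) [n] = (pre.length : Int) :=
          pvFind_first pre n rest hn
        rw [show pvLoop p (pre ++ n :: rest) (n :: rest)
              = pvBuild (pre ++ n :: rest) (PySem.Chars.find (pre ++ n :: rest) [n]) by
          simp [pvLoop, hp]]
        rw [hfind]
        unfold pvBuild pvCandAt
        by_cases hz : pre.length = 0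
        · have hpre0 : pre = [] := by cases pre <;> simp_all
          subst hpre0
          simp
        · rw [if_neg (by exact_mod_cast hz)]
          rw [PySem.List.slice_to_natCast, PySem.List.slice_from_natCast]
      · intro i hi hiq
        have hipre : i < pre.length := hiq
        rw [List.getElem_append_left hipre]
        exact hpre _ (List.getElem_mem hipre)
      · intro h
        rw [List.getElem_append_right (le_refl pre.length)]
        simpa using hp
    · have hp' : p (pvIntOfChar n) = false := by
        cases hpn : p (pvIntOfChar n)
        · rfl
        · exact absurd hpn hp
      have hstep : pvLoop p (pre ++ n :: rest) (n :: rest) = pvLoop p (pre ++ n :: rest) rest := by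
        simp [pvLoop, hp']
      rw [hstep]
      refine ih (pre ++ [n]) (by rw [List.append_assoc]; rfl) ?_
      intro c hc
      rcases List.mem_append.1 hc with h | h
      · exact hpre c h
      · rw [List.mem_singleton.1 h]; exact hp'

-- digit characters: case exhaustion and the two comparisons against 5
lemma pvDigit_cases {c : Char} (h0 : '0' ≤ c) (h9 : c ≤ '9') :
    c = '0' ∨ c = '1' ∨ c = '2' ∨ c = '3' ∨ c = '4' ∨
    c = '5' ∨ c = '6' ∨ c = '7' ∨ c = '8' ∨ c = '9' := by
  have hl : 48 ≤ c.toNat := h0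
  have hr : c.toNat ≤ 57 := h9
  have hofn : Char.ofNat c.toNat = c := Char.ofNat_toNat c
  interval_cases h : c.toNat <;>
    · rw [← hofn]
      decide

lemma pvDigit_lt5_iff {c : Char} (h0 : '0' ≤ c) (h9 : c ≤ '9') :
    (pvIntOfChar c < 5) ↔ c < '5' := by
  rcases pvDigit_cases h0 h9 with rfl|rfl|rfl|rfl|rfl|rfl|rfl|rfl|rfl|rfl <;> decide

lemma pvDigit_gt5_iff {c : Char} (h0 : '0' ≤ c) (h9 : c ≤ '9') :
    (5 < pvIntOfChar c) ↔ '5' < c := by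
  rcases pvDigit_cases h0 h9 with rfl|rfl|rfl|rfl|rfl|rfl|rfl|rfl|rfl|rfl <;> decide

-- str(m) for m : Nat consists of decimal digits
lemma pvDigitChar_digit {n : Nat} (h : n < 10) :
    '0' ≤ Nat.digitChar n ∧ Nat.digitChar n ≤ '9' := by
  interval_cases n <;> decide

lemma pvToDigitsCore_digits :
    ∀ (f n : Nat) (acc : List Char), (∀ c ∈ acc, '0' ≤ c ∧ c ≤ '9') →
      ∀ c ∈ Nat.toDigitsCore 10 f n acc, '0' ≤ c ∧ c ≤ '9' := by
  intro f
  induction f with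
  | zero => intro n acc hacc; simpa [Nat.toDigitsCore] using hacc
  | succ f ih =>
    intro n acc hacc c hc
    have hd : '0' ≤ Nat.digitChar (n % 10) ∧ Nat.digitChar (n % 10) ≤ '9' :=
      pvDigitChar_digit (Nat.mod_lt n (by norm_num))
    rw [Nat.toDigitsCore] at hc
    by_cases hz : n / 10 = 0
    · rw [if_pos hz] at hc
      rcases List.mem_cons.1 hc with rfl | hmem
      · exact hd
      · exact hacc _ hmem
    · rw [if_neg hz] at hc
      refine ih (n / 10) _ ?_ c hc
      intro d hd'
      rcases List.mem_cons.1 hd' with rfl | hmem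
      · exact hd
      · exact hacc _ hmem

lemma pvToDigits_digits (n : Nat) : ∀ c ∈ Nat.toDigits 10 n, '0' ≤ c ∧ c ≤ '9' := by
  unfold Nat.toDigits
  exact pvToDigitsCore_digits (n + 1) n [] (by simp)

-- assembling one sign case; s is the digit string shared by both ports
lemma pvPos_eq (s : List Char) (hdig : ∀ c ∈ s, '0' ≤ c ∧ c ≤ '9') :
    pvLoop (fun v => decide (v < 5)) s s =
      (PySem.List.max? (pvCands s) (fun c => c)).getD [] := by
  obtain ⟨q, hq, hres, hbefore, hat⟩ :=
    pvLoop_spec (fun v => decide (v < 5)) s s [] rfl (by simp)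
  rcases hmax : PySem.List.max? (pvCands s) (fun c => c) with _ | m
  · exact absurd ((PySem.List.max?_eq_none_iff _ _).1 hmax) (pvCands_ne_nil s)
  have hub : ∀ j, j ≤ s.length → pvCandAt s j ≤ pvCandAt s q := by
    refine pvCandAt_le_greedy hq ?_ ?_
    · intro i hi hiq
      have := hbefore i hi hiq
      have hd := hdig _ (List.getElem_mem hi)
      rw [← pvDigit_lt5_iff hd.1 hd.2]
      simpa using this
    · intro h
      have := hat h
      have hd := hdig _ (List.getElem_mem h)
      rw [← pvDigit_lt5_iff hd.1 hd.2]
      simpa using this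
  have hmem : pvCandAt s q ∈ pvCands s := pvMem_cands.2 ⟨q, hq, rfl⟩
  obtain ⟨j, hj, rfl⟩ := pvMem_cands.1 (PySem.List.max?_mem hmax)
  have h1 : pvCandAt s q ≤ pvCandAt s j := by
    have hmax0 := hmax
    rw [pvDecLT_eq] at hmax0
    have hmax' : (@PySem.List.max? (List Char) (List Char) LinearOrder.toPartialOrder.toLT
        LinearOrder.toDecidableLT (pvCands s) fun c => c) = some (pvCandAt s j) := hmax0
    have h := PySem.List.max?_isMax hmax' (pvCandAt s q) hmem
    simpa using h
  have h2 : pvCandAt s j ≤ pvCandAt s q := hub j hj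
  rw [hres]
  simp only [Option.getD_some]
  exact le_antisymm h1 h2

lemma pvNeg_eq (s : List Char) (hdig : ∀ c ∈ s, '0' ≤ c ∧ c ≤ '9') :
    pvLoop (fun v => decide (5 < v)) s s =
      (PySem.List.min? (pvCands s) (fun c => c)).getD [] := by
  obtain ⟨q, hq, hres, hbefore, hat⟩ :=
    pvLoop_spec (fun v => decide (5 < v)) s s [] rfl (by simp)
  rcases hmin : PySem.List.min? (pvCands s) (fun c => c) with _ | m
  · exact absurd ((PySem.List.min?_eq_none_iff _ _).1 hmin) (pvCands_ne_nil s)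
  have hlb : ∀ j, j ≤ s.length → pvCandAt s q ≤ pvCandAt s j := by
    refine pvGreedy_le_candAt hq ?_ ?_
    · intro i hi hiq
      have := hbefore i hi hiq
      have hd := hdig _ (List.getElem_mem hi)
      rw [← pvDigit_gt5_iff hd.1 hd.2]
      simpa using this
    · intro h
      have := hat h
      have hd := hdig _ (List.getElem_mem h)
      rw [← pvDigit_gt5_iff hd.1 hd.2]
      simpa using this
  have hmem : pvCandAt s q ∈ pvCands s := pvMem_cands.2 ⟨q, hq, rfl⟩
  obtain ⟨j, hj, rfl⟩ := pvMem_cands.1 (PySem.List.min?_mem hmin)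
  have h1 : pvCandAt s j ≤ pvCandAt s q := by
    have hmin0 := hmin
    rw [pvDecLT_eq] at hmin0
    have hmin' : (@PySem.List.min? (List Char) (List Char) LinearOrder.toPartialOrder.toLT
        LinearOrder.toDecidableLT (pvCands s) fun c => c) = some (pvCandAt s j) := hmin0
    have h := PySem.List.min?_isMin hmin' (pvCandAt s q) hmem
    simpa using h
  have h2 : pvCandAt s q ≤ pvCandAt s j := hlb j hj
  rw [hres]
  simp only [Option.getD_some]
  exact le_antisymm h2 h1

lemma pvToChars_nonneg (M : Int) (h : 0 ≤ M) :
    PySem.Int.toChars M = Nat.toDigits 10 M.toNat := by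
  unfold PySem.Int.toChars
  rw [if_neg (by omega)]

-- ===== VERDICT (by name: the statement is the Claim_ definition above) =====
theorem solution_spec : Claim_equal_solution := by
  intro N _
  unfold Spec_solution solution solution_alt
  by_cases hN : 0 ≤ N
  · rw [if_pos hN, if_pos hN]
    have habs : ((N.natAbs : Int)) = N := Int.natAbs_of_nonneg hN
    rw [habs]
    have hcs : (PySem.Int.toStr N).toList = Nat.toDigits 10 N.toNat := by
      rw [PySem.Int.toList_toStr, pvToChars_nonneg N hN]
    rw [hcs, pvPos_eq _ (pvToDigits_digits N.toNat)]
  · rw [if_neg hN, if_neg hN]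
    have hcs : (PySem.Int.toStr (N.natAbs : Int)).toList = Nat.toDigits 10 N.natAbs := by
      rw [PySem.Int.toList_toStr, pvToChars_nonneg _ (Int.natCast_nonneg _), Int.toNat_natCast]
    rw [hcs, pvNeg_eq _ (pvToDigits_digits N.natAbs)]
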